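-- pv_equiv track=rewrite | github.com/AparnaKuncham/Python-Code | PycharmProjects/untitled/venv/Scripts/wordlencount.py | wordlen
-- ===== SOURCE A (Python) =====
-- def wordlen(a,k):
--     output=''
--     word = ""
--     for letter in a:
--         if letter==" ":
--             if len(word)>=k:
--                 output=output+" "+word
--             word=""
--         else:
--             word=word+letter
--     return output
-- ===== SOURCE B (Python) =====
-- def wordlen(a, k):
--     words = a.split(" ")[:-1]
--     return "".join(" " + w for w in words if len(w) >= k)
-- ===== Notes on version B (the rewrite author's own statement) =====
-- stated objective: simpler
-- what changed: Replaces the character-by-character buffer state machine with split-on-space, drop the final segment (which A's loop never emits), filter by length and join.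
import Mathlib
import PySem

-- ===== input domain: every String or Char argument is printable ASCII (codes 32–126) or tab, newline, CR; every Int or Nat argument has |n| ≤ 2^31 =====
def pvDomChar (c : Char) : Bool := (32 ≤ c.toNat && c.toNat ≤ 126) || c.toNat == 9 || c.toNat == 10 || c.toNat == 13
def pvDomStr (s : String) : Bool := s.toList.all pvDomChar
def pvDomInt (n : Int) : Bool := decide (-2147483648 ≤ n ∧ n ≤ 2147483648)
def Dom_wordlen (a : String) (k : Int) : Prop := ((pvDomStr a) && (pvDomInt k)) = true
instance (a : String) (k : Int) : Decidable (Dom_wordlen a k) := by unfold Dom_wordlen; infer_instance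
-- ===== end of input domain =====

-- B replaces A's character-by-character buffer state machine by split-on-space / drop last segment / filter / join (simpler decomposition, same result).


-- ===== PORT A =====
-- the loop over the characters of a, state (output, word); strings carried as List Char
def wordlen (a : String) (k : Int) : String :=
  String.ofList ((a.toList.foldl (fun (st : List Char × List Char) letter =>
      if letter = ' ' then
        ((if k ≤ (st.2.length : Int) then st.1 ++ ' ' :: st.2 else st.1), [])
      else (st.1, st.2 ++ [letter])) ([], [])).1)

-- ===== PORT B =====
def wordlen_alt (a : String) (k : Int) : String :=
  match PySem.Str.split? a " " with
  | none => ""   -- unreachable: the separator " " is nonempty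
  | some segs =>
      let words := PySem.List.slice segs none (some (-1))
      PySem.Str.join "" ((words.filter (fun w => decide (k ≤ PySem.Str.len w))).map (fun w => " " ++ w))

-- ===== PRECONDITION & SPEC =====
def Spec_wordlen (a : String) (k : Int) (out : String) : Prop := out = wordlen_alt a k
instance (a : String) (k : Int) (out : String) : Decidable (Spec_wordlen a k out) := by unfold Spec_wordlen; infer_instance

-- ===== CLAIM (what is proved, stated in full; the proofs are below) =====
def Claim_equal_wordlen : Prop := ∀ (a : String) (k : Int), Dom_wordlen a k → Spec_wordlen a k (wordlen a k)

-- ===== LEMMAS AND PROOFS =====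

-- split of a char list on a single space, structurally
def mySplit : List Char → List (List Char)
  | [] => [[]]
  | c :: cs => if c = ' ' then [] :: mySplit cs else (mySplit cs).modifyHead (c :: ·)

theorem mySplit_ne_nil (cs : List Char) : mySplit cs ≠ [] := by
  cases cs with
  | nil => simp [mySplit]
  | cons c cs =>
      simp only [mySplit]
      split
      · simp
      · intro h
        have := mySplit_ne_nil cs
        cases hh : mySplit cs with
        | nil => exact this hh
        | cons s ss => rw [hh] at h; simp at h

theorem modifyHead_nilappend (l : List (List Char)) :
    List.modifyHead (fun s => [] ++ s) l = l := by
  cases l with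
  | nil => rfl
  | cons a t => simp [List.modifyHead_cons]

theorem modifyHead_id' (l : List (List Char)) : List.modifyHead (fun x => x) l = l := by
  cases l <;> simp

theorem splitOn_go_space : ∀ (fuel : Nat) (cs cur : List Char) (acc : List (List Char)),
    cs.length ≤ fuel →
    PySem.Chars.splitOn.go [' '] fuel cs cur acc
      = acc.reverse ++ (mySplit cs).modifyHead (cur.reverse ++ ·) := by
  intro fuel
  induction fuel with
  | zero =>
      intro cs cur acc h
      have : cs = [] := List.length_eq_zero_iff.mp (Nat.le_zero.mp h)
      subst this
      simp [PySem.Chars.splitOn.go, mySplit]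
  | succ n ih =>
      intro cs cur acc h
      cases cs with
      | nil => simp [PySem.Chars.splitOn.go, mySplit]
      | cons c rest =>
          simp only [PySem.Chars.splitOn.go]
          by_cases hc : c = ' '
          · subst hc
            have hpre : [' '].isPrefixOf (' ' :: rest) = true := by simp [List.isPrefixOf]
            rw [if_pos hpre]
            simp only [List.length_cons, List.length_nil, List.drop_succ_cons, List.drop_zero]
            rw [ih rest [] (List.reverse cur :: acc) (by simpa using Nat.lt_succ_iff.mp (by simpa using h))]
            simp [mySplit, modifyHead_id', List.modifyHead_cons]
          · have hpre : [' '].isPrefixOf (c :: rest) = false := by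
              simp [List.isPrefixOf]; exact fun h' => (hc h'.symm).elim
            rw [if_neg (by simp [hpre])]
            rw [ih rest (c :: cur) acc (by simpa using Nat.lt_succ_iff.mp (by simpa using h))]
            simp only [mySplit, if_neg hc, List.modifyHead_modifyHead]
            congr 1
            congr 1
            funext s
            simp

theorem splitOn_space (cs : List Char) :
    PySem.Chars.splitOn cs [' '] = mySplit cs := by
  unfold PySem.Chars.splitOn
  rw [splitOn_go_space (cs.length + 1) cs [] [] (by omega)]
  simp [modifyHead_id']

-- A's loop as a pure recursion on the remaining characters (word = pending buffer)
def gloop (k : Int) : List Char → List Char → List Char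
  | [], _ => []
  | c :: cs, w =>
      if c = ' ' then (if k ≤ (w.length : Int) then ' ' :: w else []) ++ gloop k cs []
      else gloop k cs (w ++ [c])

theorem foldl_gloop (k : Int) : ∀ (cs : List Char) (out w : List Char),
    (cs.foldl (fun (st : List Char × List Char) letter =>
      if letter = ' ' then
        ((if k ≤ (st.2.length : Int) then st.1 ++ ' ' :: st.2 else st.1), [])
      else (st.1, st.2 ++ [letter])) (out, w)).1 = out ++ gloop k cs w := by
  intro cs
  induction cs with
  | nil => intro out w; simp [gloop]
  | cons c cs ih =>
      intro out w
      simp only [List.foldl_cons, gloop]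
      by_cases hc : c = ' '
      · subst hc
        rw [if_pos rfl, if_pos rfl]
        by_cases hk : k ≤ (w.length : Int)
        · rw [if_pos hk, if_pos hk, ih]; simp
        · rw [if_neg hk, if_neg hk, ih]; simp
      · rw [if_neg hc, if_neg hc, ih]

-- B's pipeline over mySplit, at the List Char level
def bpipe (k : Int) (segs : List (List Char)) : List Char :=
  ((segs.dropLast.filter (fun s => decide (k ≤ (s.length : Int)))).map (' ' :: ·)).flatten

theorem gloop_eq_bpipe (k : Int) : ∀ (cs w : List Char),
    gloop k cs w = bpipe k ((mySplit cs).modifyHead (w ++ ·)) := by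
  intro cs
  induction cs with
  | nil => intro w; simp [gloop, mySplit, bpipe, List.modifyHead]
  | cons c cs ih =>
      intro w
      by_cases hc : c = ' '
      · subst hc
        have h1 : mySplit (' ' :: cs) = [] :: mySplit cs := by simp [mySplit]
        rw [h1, List.modifyHead_cons]
        simp only [gloop, if_true]
        rw [ih [], modifyHead_nilappend]
        unfold bpipe
        rw [List.dropLast_cons_of_ne_nil (mySplit_ne_nil cs)]
        simp only [List.filter_cons, List.append_nil]
        by_cases hk : k ≤ (w.length : Int)
        · simp [hk]
        · simp [hk]
      · have h1 : mySplit (c :: cs) = (mySplit cs).modifyHead (c :: ·) := by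
          simp [mySplit, hc]
        rw [h1, List.modifyHead_modifyHead]
        simp only [gloop, if_neg hc]
        rw [ih (w ++ [c])]
        congr 2
        funext s
        simp

theorem intersperse_nil_flatten (l : List (List Char)) :
    (List.intersperse ([] : List Char) l).flatten = l.flatten := by
  induction l with
  | nil => rfl
  | cons a t ih =>
      cases t with
      | nil => rfl
      | cons b t' => simpa [List.intersperse] using ih

-- ===== VERDICT (by name: the statement is the Claim_ definition above) =====
theorem wordlen_spec : Claim_equal_wordlen := by
  intro a k _
  unfold Spec_wordlen wordlen wordlen_alt
  cases hs : PySem.Str.split? a " " with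
  | none =>
      exact absurd hs (by simp [PySem.Str.split?, PySem.Chars.split?])
  | some segs =>
      have hmap : segs.map String.toList = mySplit a.toList := by
        have h := PySem.Str.split?_map a " "
        rw [hs] at h
        rw [show (" " : String).toList = [' '] from rfl] at h
        simp only [Option.map_some, PySem.Chars.split?, List.isEmpty_cons,
          Bool.false_eq_true, if_false, Option.some.injEq] at h
        rw [h, splitOn_space]
      rw [foldl_gloop, List.nil_append, gloop_eq_bpipe, modifyHead_nilappend]
      rw [← String.toList_inj]
      rw [PySem.Str.toList_join, String.toList_ofList]
      simp only [PySem.List.slice_to_neg_one]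
      unfold bpipe
      rw [← hmap, ← List.map_dropLast]
      have hfilter : (List.map String.toList segs.dropLast).filter (fun s => decide (k ≤ (s.length : Int)))
          = (segs.dropLast.filter (fun w => decide (k ≤ PySem.Str.len w))).map String.toList := by
        rw [List.filter_map]
        simp [Function.comp_def, PySem.Str.len_eq]
      rw [hfilter]
      simp only [PySem.Chars.join, List.intercalate]
      rw [show ("" : String).toList = ([] : List Char) from rfl, intersperse_nil_flatten]
      rw [List.map_map, List.map_map]
      simp [Function.comp_def]
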